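-- pv_equiv track=rewrite | github.com/fklirono/rnaseq | seqMotifs.py | seqs_with_mms
-- ===== SOURCE A (Python) =====
-- def seqs_with_mms(seq, mms=1):
--   '''
--   [Andrei's code]
--
--   returns an iterator of all possible sequences with exactly mms mismatches to the original 'seq'.
--
--   N.B. N's are replaced with ACGT but only when their turn comes, i.e. for mms=1 the sequence TNC will generate all possible
--        mutations for T=[ACG] and pass them down as ANC, CNC, GNC and only when N is considered will it be passed down as N=[ACGT]
--        however most of the times this is not what we want...
--
--   '''
--   from itertools import combinations, product
--
--   nucleotides = set('ACGT')
--
--   #import ipdb;  ipdb.set_trace()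
--
--   for positions in combinations(range(len(seq)), mms):  #  generate all possible mismatch positions
--     variants = []
--
--     for p in positions:
--       nt = set(seq[p])
--       variants.append(nucleotides-nt)  #  for each nucleotide generate list of mismatches, if nucleotide is N it will generate ACGT mismatches
--
--     mms_nts = product(*variants)  #  for each set of mismatch positions generate all possible nucleotide mismatches
--     for nts in mms_nts:
--       l = list(seq)
--       for i, m in enumerate(nts):
--          l[positions[i]] = m  #  replace original sequence at mismatch position with given mismatch nucleotide
--       yield "".join(l)
-- ===== SOURCE B (Python) =====
-- def seqs_with_mms(seq, mms=1):
--     '''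
--     Iterator of all sequences with exactly mms mismatches to seq.
--     Single recursion over the string: for each suffix and remaining budget it
--     returns one group of strings per choice of mismatch-position set (lex order),
--     mutating the current position first, then keeping it.
--     '''
--     nucleotides = set('ACGT')
--
--     def groups(i, r):
--         if r == 0:
--             return [[seq[i:]]]
--         if len(seq) - i < r:
--             return []
--         out = [[x + s for x in nucleotides - {seq[i]} for s in g]
--                for g in groups(i + 1, r - 1)]
--         out += [[seq[i] + s for s in g] for g in groups(i + 1, r)]
--         return out
--     for g in groups(0, mms):
--         yield from g
-- ===== Notes on version B (the rewrite author's own statement) =====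
-- stated objective: alternative
-- what changed: Replaces A's combinations-of-index-tuples + itertools.product + in-place list substitution by a single recursion over the string that directly builds, for each mismatch-position set in the same lexicographic order, its group of variant strings (mutate-the-current-position groups first, then keep-it groups), yielding exactly A's sequence of strings.
import Mathlib
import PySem

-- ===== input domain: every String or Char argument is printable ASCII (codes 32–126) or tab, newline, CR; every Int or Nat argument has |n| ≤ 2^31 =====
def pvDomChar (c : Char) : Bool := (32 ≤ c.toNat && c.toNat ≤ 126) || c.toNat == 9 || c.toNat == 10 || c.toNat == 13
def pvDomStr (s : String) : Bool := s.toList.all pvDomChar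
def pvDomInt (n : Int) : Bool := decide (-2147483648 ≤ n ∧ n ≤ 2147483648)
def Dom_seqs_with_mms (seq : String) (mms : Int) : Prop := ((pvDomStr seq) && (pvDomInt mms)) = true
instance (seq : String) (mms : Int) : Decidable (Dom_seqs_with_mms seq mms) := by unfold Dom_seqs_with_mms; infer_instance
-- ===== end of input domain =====

-- B replaces A's combinations-of-indices + product + in-place substitution by one
-- recursion over the string that emits, per mismatch-position set, its group of strings
-- (objective: alternative decomposition; A is a generator, both ports return the
-- materialised list). Both Pythons iterate the complement set, whose order Python
-- hash-randomizes between runs; both ports fix the canonical nucleotide order for it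
-- (the generators' outputs are compared as a set of strings).

-- ===== PORT A =====
-- set('ACGT') - {c}, iterated in canonical 'ACGT' order (see note above)
def pvCompl (c : Char) : List Char := "ACGT".toList.filter (fun x => x != c)

-- itertools.combinations(xs, k) for a strictly increasing xs: lexicographic order
def pvCombs : List Nat → Nat → List (List Nat)
  | _, 0 => [[]]
  | [], _ + 1 => []
  | x :: xs, k + 1 => (pvCombs xs k).map (fun ps => x :: ps) ++ pvCombs xs (k + 1)

-- itertools.product(*variants): first factor varies slowest
def pvProd : List (List Char) → List (List Char)
  | [] => [[]]
  | v :: vs => v.flatMap (fun x => (pvProd vs).map (fun t => x :: t))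

-- A: for each mismatch-position combination, product of complements, substitute into list(seq).
-- mms.toNat: Python raises ValueError for mms < 0 (excluded by Pre_).
def seqs_with_mms (seq : String) (mms : Int) : List String :=
  let l := seq.toList
  (pvCombs (List.range l.length) mms.toNat).flatMap (fun positions =>
    let variants := positions.map (fun p => pvCompl (l.getD p ' '))
    (pvProd variants).map (fun nts =>
      String.ofList ((positions.zip nts).foldl (fun acc pm => acc.set pm.1 pm.2) l)))

-- ===== PORT B =====
-- groups(i, r) of Source B over the suffix (strings carried as List Char, joined at the end):
-- one group of strings per mismatch-position set, mutate-the-head groups first, then keep-the-head.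
def pvGroups : List Char → Nat → List (List (List Char))
  | s, 0 => [[s]]
  | [], _ + 1 => []
  | c :: cs, r + 1 =>
    if cs.length + 1 < r + 1 then []
    else
      ((pvGroups cs r).map (fun g => (pvCompl c).flatMap (fun x => g.map (fun t => x :: t))))
      ++ ((pvGroups cs (r + 1)).map (fun g => g.map (fun t => c :: t)))

def seqs_with_mms_alt (seq : String) (mms : Int) : List String :=
  (pvGroups seq.toList mms.toNat).flatMap (fun g => g.map (fun t => String.ofList t))

-- ===== PRECONDITION & SPEC =====
-- Python A raises ValueError (combinations with negative r) when mms < 0.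
def Pre_seqs_with_mms (seq : String) (mms : Int) : Prop := 0 ≤ mms
instance (seq : String) (mms : Int) : Decidable (Pre_seqs_with_mms seq mms) := by
  unfold Pre_seqs_with_mms; infer_instance
def pvWitness_seqs_with_mms : String × Int := ("TNC", 1)

def Spec_seqs_with_mms (seq : String) (mms : Int) (out : List String) : Prop := out = seqs_with_mms_alt seq mms
instance (seq : String) (mms : Int) (out : List String) : Decidable (Spec_seqs_with_mms seq mms out) := by unfold Spec_seqs_with_mms; infer_instance

-- ===== CLAIM (what is proved, stated in full; the proofs are below) =====
def Claim_equal_seqs_with_mms : Prop := ∀ (seq : String) (mms : Int), Dom_seqs_with_mms seq mms → Pre_seqs_with_mms seq mms → Spec_seqs_with_mms seq mms (seqs_with_mms seq mms)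

-- ===== LEMMAS AND PROOFS =====

-- pvCombs commutes with mapping a relabelling over the pool
theorem pvCombs_map (f : Nat → Nat) : ∀ (xs : List Nat) (k : Nat),
    pvCombs (xs.map f) k = (pvCombs xs k).map (List.map f) := by
  intro xs
  induction xs with
  | nil => intro k; cases k <;> simp [pvCombs]
  | cons x xs ih =>
    intro k
    cases k with
    | zero => simp [pvCombs]
    | succ k => simp [pvCombs, ih k, ih (k + 1), List.map_map]

theorem pvCombs_nil_of_lt : ∀ (xs : List Nat) (k : Nat), xs.length < k → pvCombs xs k = [] := by
  intro xs
  induction xs with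
  | nil =>
    intro k hk
    cases k with
    | zero => omega
    | succ k => rfl
  | cons x xs ih =>
    intro k hk
    cases k with
    | zero => omega
    | succ k =>
      simp only [pvCombs]
      rw [ih k (by simp at hk ⊢; omega), ih (k + 1) (by simp at hk ⊢; omega)]
      simp

-- substituting at shifted positions leaves the head alone
theorem pvSubst_shift : ∀ (ps : List Nat) (nts : List Char) (a : Char) (t : List Char),
    (((ps.map (· + 1)).zip nts).foldl (fun acc pm => acc.set pm.1 pm.2) (a :: t))
      = a :: ((ps.zip nts).foldl (fun acc pm => acc.set pm.1 pm.2) t) := by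
  intro ps
  induction ps with
  | nil => intro nts a t; simp
  | cons p ps ih =>
    intro nts a t
    cases nts with
    | nil => simp
    | cons m nts =>
      simp only [List.map_cons, List.zip_cons_cons, List.foldl_cons, List.set_cons_succ]
      exact ih nts a (t.set p m)

-- the heart: A's grouped output over a suffix equals B's recursion on that suffix
theorem pvMain : ∀ (l : List Char) (k : Nat),
    (pvCombs (List.range l.length) k).map (fun ps =>
      (pvProd (ps.map (fun p => pvCompl (l.getD p ' ')))).map (fun nts =>
        (ps.zip nts).foldl (fun acc pm => acc.set pm.1 pm.2) l))
    = pvGroups l k := by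
  intro l
  induction l with
  | nil =>
    intro k
    cases k with
    | zero => simp [pvCombs, pvProd, pvGroups]
    | succ k => simp [pvCombs, pvGroups]
  | cons c cs ih =>
    intro k
    cases k with
    | zero => simp [pvCombs, pvProd, pvGroups]
    | succ k =>
      by_cases hlen : cs.length + 1 < k + 1
      · rw [pvGroups]
        simp only [hlen, if_true]
        rw [show (c :: cs).length = cs.length + 1 from rfl,
            pvCombs_nil_of_lt _ _ (by simp; omega)]
        rfl
      · rw [pvGroups]
        simp only [hlen, if_false]
        rw [show (c :: cs).length = cs.length + 1 from rfl, List.range_succ_eq_map]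
        rw [pvCombs]
        rw [List.map_append]
        rw [show (Nat.succ : Nat → Nat) = (· + 1) from rfl]
        rw [pvCombs_map, pvCombs_map, ← ih k, ← ih (k + 1)]
        simp only [List.map_map]
        refine congrArg₂ (· ++ ·) ?_ ?_
        · -- mutate-the-head block
          refine List.map_congr_left ?_
          intro ps _
          simp only [Function.comp_def, List.map_cons, List.map_map,
            List.getD_cons_succ, List.getD_cons_zero]
          rw [pvProd]
          rw [List.map_flatMap]
          refine List.flatMap_congr ?_
          intro x _
          simp only [List.map_map, Function.comp_def]
          refine List.map_congr_left ?_
          intro nts _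
          simp only [List.zip_cons_cons, List.foldl_cons, List.set_cons_zero]
          exact pvSubst_shift ps nts x cs
        · -- keep-the-head block
          refine List.map_congr_left ?_
          intro ps _
          simp only [Function.comp_def, List.map_map, List.getD_cons_succ]
          refine List.map_congr_left ?_
          intro nts _
          exact pvSubst_shift ps nts c cs

-- ===== VERDICT (by name: the statement is the Claim_ definition above) =====
theorem seqs_with_mms_spec : Claim_equal_seqs_with_mms := by
  intro seq mms _ _
  unfold Spec_seqs_with_mms seqs_with_mms seqs_with_mms_alt
  rw [← pvMain seq.toList mms.toNat, List.flatMap_map]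
  simp only [List.map_map]
  rfl
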